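-- pv_equiv track=rewrite | github.com/sdehoog/AoC_2021 | Day 10/AoC_Day_10.py | line_score
-- ===== SOURCE A (Python) =====
-- def line_score(line):
--     score = 0
--     score_dict = {
--         ')': 1,
--         ']': 2,
--         '}': 3,
--         '>': 4}
--     for char in line:
--         score = score * 5 + score_dict[char]
--
--     return score
-- ===== SOURCE B (Python) =====
-- def line_score(line):
--     score_dict = {
--         ')': 1,
--         ']': 2,
--         '}': 3,
--         '>': 4}
--     return sum(score_dict[char] * 5**i for i, char in enumerate(reversed(line)))
-- ===== Notes on version B (the rewrite author's own statement) =====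
-- stated objective: alternative
-- what changed: Replaces the Horner-style running accumulator (score = score*5 + digit) with an explicit positional base-5 sum over the reversed line, weighting each bracket's digit by 5**i.
import Mathlib
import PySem

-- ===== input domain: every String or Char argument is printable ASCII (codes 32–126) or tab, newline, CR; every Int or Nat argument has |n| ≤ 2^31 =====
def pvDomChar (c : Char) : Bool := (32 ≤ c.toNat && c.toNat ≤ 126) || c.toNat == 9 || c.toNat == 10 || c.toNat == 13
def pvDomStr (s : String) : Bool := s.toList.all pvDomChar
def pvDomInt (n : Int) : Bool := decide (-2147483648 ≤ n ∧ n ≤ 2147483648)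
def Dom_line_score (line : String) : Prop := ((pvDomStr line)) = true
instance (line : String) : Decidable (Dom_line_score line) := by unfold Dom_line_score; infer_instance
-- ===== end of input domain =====

-- B replaces A's Horner multiply-and-add accumulator by an explicit positional base-5 sum
-- over the reversed line (digit * 5^i); objective: alternative decomposition, same cost.

-- ===== PORT A =====
-- the literal score_dict of A (KeyError on a missing key is excluded by Pre_line_score; getD's
-- default is never reached inside Pre_)
def pvScoreDict : PySem.Dict Char Int :=
  PySem.Dict.ofList [(')', 1), (']', 2), ('}', 3), ('>', 4)]

def line_score (line : String) : Int :=
  line.toList.foldl (fun score char => score * 5 + pvScoreDict.getD char 0) 0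

-- ===== PORT B =====
def line_score_alt (line : String) : Int :=
  (PySem.List.enumerate line.toList.reverse).foldl
    (fun acc p => acc + pvScoreDict.getD p.2 0 * 5 ^ p.1.toNat) 0

-- ===== PRECONDITION & SPEC =====
-- Pre_: every character has an entry in score_dict; on any other character Python's
-- score_dict[char] raises KeyError, so A returns no value there.
def Pre_line_score (line : String) : Prop :=
  line.toList.all (fun c => pvScoreDict.contains c) = true
instance (line : String) : Decidable (Pre_line_score line) := by unfold Pre_line_score; infer_instance

def pvWitness_line_score : String := ")]}>"

def Spec_line_score (line : String) (out : Int) : Prop := out = line_score_alt line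
instance (line : String) (out : Int) : Decidable (Spec_line_score line out) := by unfold Spec_line_score; infer_instance

-- ===== CLAIM (what is proved, stated in full; the proofs are below) =====
def Claim_equal_line_score : Prop := ∀ (line : String), Dom_line_score line → Pre_line_score line → Spec_line_score line (line_score line)

-- ===== LEMMAS AND PROOFS =====

-- positional sum starting at place s equals 5^s times the Horner value of the reversed digits
theorem pv_pos_sum_eq_horner (r : List Char) (acc : Int) (s : Nat) :
    (PySem.List.enumerate r (s : Int)).foldl
        (fun acc p => acc + pvScoreDict.getD p.2 0 * 5 ^ p.1.toNat) acc
      = acc + 5 ^ s * r.reverse.foldl (fun score char => score * 5 + pvScoreDict.getD char 0) 0 := by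
  induction r generalizing acc s with
  | nil => simp [PySem.List.enumerate_nil]
  | cons c t ih =>
    rw [PySem.List.enumerate_cons]
    simp only [List.foldl_cons, List.reverse_cons, List.foldl_append, List.foldl_cons,
      List.foldl_nil]
    have h1 : ((s : Int) + 1) = ((s + 1 : Nat) : Int) := by push_cast; ring
    rw [h1, ih]
    simp [Int.toNat_natCast, pow_succ]
    ring

theorem line_score_spec : Claim_equal_line_score := by
  intro line _ _
  unfold Spec_line_score line_score line_score_alt
  have h := pv_pos_sum_eq_horner line.toList.reverse 0 0
  rw [List.reverse_reverse] at h
  simpa using h.symm
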